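-- pv_equiv track=rewrite | github.com/qifanyyy/JupyterNotebook | new_algs/Sequence+algorithms/Smith-Waterman+algorithm/Vhaijaiyanthi_pa3.py | rightArc
-- ===== SOURCE A (Python) =====
-- from collections import defaultdict
--
-- def rightArc(all, tag_group):
--
--     allRight = []
--     for h in all:
--         stay = defaultdict(list)
--         for i in h:
--             j = h[i][::2]
--             k = h[i][1::2]
--             # ELEMENTS WITH AN INDEX VALUE GREATER THAN THE INDEX NUMBER IN A SENTENCE
--             # ARE COLLECTED AND APPENDED TO A LIST
--             for l in range(len(j)):
--                 if j[l]< k[l] and j[l] != 0: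
--                     stay[i].append(j[l])
--         allRight.append(dict(stay)) #LIST
--
--     allList_Right = {}
--
--     for h in tag_group:
--
--         rightTag = []
--         for i in all:
--             if h in i:
--                 rightTag.append(list(i[h][1::2]))
--             else:
--                 rightTag.append(["null"])
--
--         allList_Right[h] = rightTag # DICTIONARY
--
--     right_tree = {}
--     for tup in tag_group:
--
--         count = 0
--         stay = {}
--         for sentence in allRight:
--             if tup in sentence:
--                 j = sentence[tup]
--                 for diff_tags in allList_Right:
--                     i = allList_Right[diff_tags]
--                     l = i[count]
--                     for h in range(len(j)):
--                         if j[h] in l or j[h] == l: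
--                             if diff_tags in stay:
--                                 stay[diff_tags] = stay[diff_tags] + 1
--                             else:
--                                 stay[diff_tags] = 1
--             count += 1
--
--         right_tree[tup] = stay
--
--     return right_tree
-- ===== SOURCE B (Python) =====
-- def rightArc(all, tag_group):
--     # Inverted index: per sentence, map each child (odd-position) value to the tags
--     # carrying it, then count matches for each head tag by lookups in that index
--     # instead of per-tag membership scans over child lists.
--     tags = list(dict.fromkeys(tag_group))
--     per_sent = []
--     for sent in all:
--         postings = {}
--         for d in tags:
--             if d in sent:
--                 for x in dict.fromkeys(sent[d][1::2]):
--                     postings.setdefault(x, []).append(d)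
--         arcs = {}
--         for i in sent:
--             v = sent[i]
--             vals = [a for a, b in zip(v[::2], v[1::2]) if a < b and a != 0]
--             if vals:
--                 arcs[i] = vals
--         per_sent.append((arcs, postings))
--     right_tree = {}
--     for tup in tag_group:
--         stay = {}
--         for arcs, postings in per_sent:
--             if tup in arcs:
--                 counts = {}
--                 for x in arcs[tup]:
--                     for d in postings.get(x, ()):
--                         counts[d] = counts.get(d, 0) + 1
--                 for d in tags:
--                     c = counts.get(d, 0)
--                     if c:
--                         stay[d] = stay.get(d, 0) + c
--         right_tree[tup] = stay
--     return right_tree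
-- ===== Notes on version B (the rewrite author's own statement) =====
-- stated objective: faster
-- what changed: A scans every tag's full child list for every arc value of every head tag (membership tests inside a tag-by-sentence table walk); B instead builds, once per sentence, an inverted index from child value to the tags carrying it plus the qualifying arc values, and counts co-occurrences by index lookups merged back in tag order.
import Mathlib
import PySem

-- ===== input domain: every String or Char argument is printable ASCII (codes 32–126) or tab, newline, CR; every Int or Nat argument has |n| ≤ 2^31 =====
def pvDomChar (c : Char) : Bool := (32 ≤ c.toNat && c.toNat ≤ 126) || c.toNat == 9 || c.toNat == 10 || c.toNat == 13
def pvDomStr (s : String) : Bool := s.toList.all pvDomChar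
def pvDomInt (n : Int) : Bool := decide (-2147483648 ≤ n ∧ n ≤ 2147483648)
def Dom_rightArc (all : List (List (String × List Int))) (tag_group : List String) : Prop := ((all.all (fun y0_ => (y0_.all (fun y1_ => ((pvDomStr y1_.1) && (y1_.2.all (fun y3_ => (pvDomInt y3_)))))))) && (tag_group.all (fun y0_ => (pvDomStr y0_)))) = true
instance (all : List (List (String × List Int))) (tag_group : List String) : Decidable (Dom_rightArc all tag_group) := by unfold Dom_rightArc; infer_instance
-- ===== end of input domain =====

-- B replaces A's per-tag membership scans over child lists by an inverted index built
-- once per sentence (child value -> tags carrying it); matches are then counted by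
-- index lookups. Same return value on Pre_ (no argument is mutated by either version).

-- ===== PORT A =====
-- shared slice transliterations: v[::2] and v[1::2]
def pvEv (v : List Int) : List Int := (PySem.List.slice? v none none 2).getD []
def pvOd (v : List Int) : List Int := (PySem.List.slice? v (some 1) none 2).getD []

-- first-pass loop body for one key of a sentence: 'j = h[i][::2]; k = h[i][1::2];
-- for l in range(len(j)): if j[l] < k[l] and j[l] != 0: stay[i].append(j[l])'.
-- The keys of a Dict are unique, so 'h[i]' is the item's value p.2; an out-of-range
-- k[l] (Python IndexError, excluded by Pre_) is read through pyGetD's default.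
def pvStepA (stay : PySem.Dict String (List Int)) (p : String × List Int) : PySem.Dict String (List Int) :=
  let j := pvEv p.2
  let k := pvOd p.2
  (PySem.List.pyRange 0 (PySem.List.len j) 1).foldl (fun stay l =>
    if PySem.List.pyGetD j l 0 < PySem.List.pyGetD k l 0 ∧ PySem.List.pyGetD j l 0 ≠ 0
    then stay.modify p.1 [] (· ++ [PySem.List.pyGetD j l 0]) else stay) stay

-- 'stay = defaultdict(list); for i in h: …; dict(stay)' — a key enters stay only when
-- something is appended to it, which pvStepA reproduces.
def pvSentStay (h : PySem.Dict String (List Int)) : PySem.Dict String (List Int) :=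
  h.items.foldl pvStepA PySem.Dict.empty

-- second-pass element: 'list(i[h][1::2]) if h in i else ["null"]'.  The ["null"]
-- placeholder is modelled as 'none': for an int x, Python's 'x in ["null"]' and
-- 'x == ["null"]' are both False, which is exactly the 'none' branch of pvInnerA.
def pvChild (h : String) (i : PySem.Dict String (List Int)) : Option (List Int) :=
  if i.contains h then some (pvOd (i.getD h [])) else none

-- third-pass innermost loop: 'for h in range(len(j)): if j[h] in l or j[h] == l: …'
def pvInnerA (j : List Int) (l : Option (List Int)) (q1 : String)
    (stay : PySem.Dict String Int) : PySem.Dict String Int :=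
  (PySem.List.pyRange 0 (PySem.List.len j) 1).foldl (fun stay h2 =>
    if (match l with
        | some kids => kids.contains (PySem.List.pyGetD j h2 0)
        | none => false)
    then (if stay.contains q1 then stay.insert q1 (stay.getD q1 0 + 1)
          else stay.insert q1 1)
    else stay) stay

-- third-pass per-sentence body: 'if tup in sentence: j = sentence[tup];
-- for diff_tags in allList_Right: i = allList_Right[diff_tags]; l = i[count]; …'
def pvSentA (AL : List (String × List (Option (List Int)))) (tup : String) (count : Int)
    (stay : PySem.Dict String Int) (sentence : PySem.Dict String (List Int)) : PySem.Dict String Int :=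
  if sentence.contains tup then
    let j := sentence.getD tup []
    AL.foldl (fun stay q => pvInnerA j (PySem.List.pyGetD q.2 count none) q.1 stay) stay
  else stay

def rightArc (all : List (List (String × List Int))) (tag_group : List String) : List (String × List (String × Int)) :=
  let allD := all.map PySem.Dict.ofList
  let allRight := allD.foldl (fun acc h => acc ++ [pvSentStay h]) []
  let allList_Right := tag_group.foldl (fun d h =>
    d.insert h (allD.foldl (fun acc i => acc ++ [pvChild h i]) [])) PySem.Dict.empty
  let right_tree := tag_group.foldl (fun rt tup =>
    rt.insert tup ((allRight.foldl (fun st sentence =>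
      (st.1 + 1, pvSentA allList_Right.items tup st.1 st.2 sentence))
      ((0 : Int), PySem.Dict.empty)).2)) PySem.Dict.empty
  right_tree.items.map (fun p => (p.1, p.2.items))

-- ===== PORT B =====
-- postings build for one tag d: 'if d in sent: for x in dict.fromkeys(sent[d][1::2]):
-- postings.setdefault(x, []).append(d)'.  'setdefault(x, []).append(d)' is exactly
-- Dict.modify x [] (· ++ [d]) (same key position and resulting value).
def pvPost (sent : PySem.Dict String (List Int)) (po : PySem.Dict Int (List String)) (d : String) : PySem.Dict Int (List String) :=
  if sent.contains d then
    (PySem.List.dedup (pvOd (sent.getD d []))).foldl (fun po x => po.modify x [] (· ++ [d])) po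
  else po

-- 'arcs = {}; for i in sent: v = sent[i]; vals = [a for a, b in zip(...) if ...];
-- if vals: arcs[i] = vals'
def pvArcs (raw : List (String × List Int)) : PySem.Dict String (List Int) :=
  (PySem.Dict.ofList raw).items.foldl (fun a p =>
    let vals := (((pvEv p.2).zip (pvOd p.2)).filter
      (fun q => decide (q.1 < q.2 ∧ q.1 ≠ 0))).map Prod.fst
    if vals ≠ [] then a.insert p.1 vals else a) PySem.Dict.empty

-- 'counts = {}; for x in arcs[tup]: for d in postings.get(x, ()): counts[d] = counts.get(d, 0) + 1'
def pvCounts (vals : List Int) (post : PySem.Dict Int (List String)) : PySem.Dict String Int :=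
  vals.foldl (fun c x => (post.getD x []).foldl (fun c d => c.insert d (c.getD d 0 + 1)) c) PySem.Dict.empty

-- per-sentence body of the third loop: lookups only
def pvSentB (tags : List String) (tup : String) (stay : PySem.Dict String Int)
    (data : PySem.Dict String (List Int) × PySem.Dict Int (List String)) : PySem.Dict String Int :=
  if data.1.contains tup then
    let counts := pvCounts (data.1.getD tup []) data.2
    tags.foldl (fun stay d =>
      let c := counts.getD d 0
      if c ≠ 0 then stay.insert d (stay.getD d 0 + c) else stay) stay
  else stay

def rightArc_alt (all : List (List (String × List Int))) (tag_group : List String) : List (String × List (String × Int)) :=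
  let tags := PySem.List.dedup tag_group
  let perSent := all.map (fun s =>
    (pvArcs s, tags.foldl (pvPost (PySem.Dict.ofList s)) PySem.Dict.empty))
  let right_tree := tag_group.foldl (fun rt tup =>
    rt.insert tup (perSent.foldl (pvSentB tags tup) PySem.Dict.empty)) PySem.Dict.empty
  right_tree.items.map (fun p => (p.1, p.2.items))

-- ===== PRECONDITION & SPEC =====
-- A raises IndexError as soon as some looked-up tag value has odd length (its [::2] half
-- is then one longer than its [1::2] half); Pre_ admits exactly the inputs on which every
-- effective (post dict-construction) value list has even length.
def Pre_rightArc (all : List (List (String × List Int))) (tag_group : List String) : Prop :=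
  ∀ h ∈ all, ∀ p ∈ (PySem.Dict.ofList h).items, p.2.length % 2 = 0
instance (all : List (List (String × List Int))) (tag_group : List String) : Decidable (Pre_rightArc all tag_group) := by unfold Pre_rightArc; infer_instance
def pvWitness_rightArc : (List (List (String × List Int))) × List String :=
  ([[("N", [1, 2]), ("V", [2, 3, 0, 1])]], ["N", "V"])

def Spec_rightArc (all : List (List (String × List Int))) (tag_group : List String) (out : List (String × List (String × Int))) : Prop := out = rightArc_alt all tag_group
instance (all : List (List (String × List Int))) (tag_group : List String) (out : List (String × List (String × Int))) : Decidable (Spec_rightArc all tag_group out) := by unfold Spec_rightArc; infer_instance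

-- ===== CLAIM (what is proved, stated in full; the proofs are below) =====
def Claim_equal_rightArc : Prop := ∀ (all : List (List (String × List Int))) (tag_group : List String), Dom_rightArc all tag_group → Pre_rightArc all tag_group → Spec_rightArc all tag_group (rightArc all tag_group)

-- ===== LEMMAS AND PROOFS =====

lemma fm_len {α : Type} (xs : List α) (f : Nat → Nat) :
    ∀ (c : Nat), (∀ k < c, f k < xs.length) →
    ((List.range c).filterMap (fun k => xs[f k]?)).length = c := by
  intro c
  induction c with
  | zero => simp
  | succ n ih =>
    intro h
    rw [List.range_succ, List.filterMap_append]
    simp [List.getElem?_eq_getElem (h n (by omega)), ih (fun k hk => h k (by omega))]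

lemma pv_len_ev (v : List Int) : (pvEv v).length = (v.length + 1) / 2 := by
  unfold pvEv
  simp only [PySem.List.slice?, PySem.List.sliceIndices]
  norm_num
  rw [fm_len]
  · split_ifs with h0 <;> omega
  · intro k hk
    split_ifs at hk with h0 <;> omega

lemma pv_len_od (v : List Int) : (pvOd v).length = v.length / 2 := by
  unfold pvOd
  simp only [PySem.List.slice?, PySem.List.sliceIndices]
  norm_num
  rw [fm_len]
  · split_ifs <;> omega
  · intro k hk
    split_ifs at hk <;> omega

lemma nat_range2fold {β : Type} : ∀ (j k : List Int), j.length = k.length →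
    ∀ (g : β → Int → Int → β) (init : β),
    (List.range j.length).foldl (fun acc l => g acc (j.getD l 0) (k.getD l 0)) init
    = (j.zip k).foldl (fun acc p => g acc p.1 p.2) init := by
  intro j
  induction j with
  | nil => intro k h g init; simp
  | cons a j' ih =>
    intro k h g init
    cases k with
    | nil => simp at h
    | cons b k' =>
      simp only [List.length_cons, List.range_succ_eq_map, List.foldl_cons, List.foldl_map,
        List.getD_cons_zero, List.getD_cons_succ, List.zip_cons_cons]
      exact ih k' (by simpa using h) g (g init a b)

lemma pv_range2fold {β : Type} (j k : List Int) (hlen : j.length = k.length)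
    (g : β → Int → Int → β) (init : β) :
    (PySem.List.pyRange 0 (PySem.List.len j) 1).foldl
      (fun acc l => g acc (PySem.List.pyGetD j l 0) (PySem.List.pyGetD k l 0)) init
    = (j.zip k).foldl (fun acc p => g acc p.1 p.2) init := by
  rw [PySem.List.pyRange_one, List.foldl_map]
  simp only [PySem.List.len, zero_add, Int.sub_zero, Int.toNat_natCast,
    PySem.List.pyGetD_natCast]
  exact nat_range2fold j k hlen g init

lemma pv_incr_fold (P : Int → Bool) (d : String) : ∀ (vals : List Int) (stay : PySem.Dict String Int),
    vals.foldl (fun stay x =>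
      if P x then (if stay.contains d then stay.insert d (stay.getD d 0 + 1)
                   else stay.insert d 1) else stay) stay
    = if (vals.countP P) = 0 then stay
      else stay.insert d (stay.getD d 0 + (vals.countP P : Int)) := by
  intro vals
  induction vals with
  | nil => simp
  | cons x t ih =>
    intro stay
    by_cases hp : P x
    · have hstep : (if stay.contains d then stay.insert d (stay.getD d 0 + 1)
                    else stay.insert d 1) = stay.insert d (stay.getD d 0 + 1) := by
        by_cases hc : stay.contains d
        · simp [hc]
        · simp only [Bool.not_eq_true] at hc
          rw [if_neg (by simp [hc]), PySem.Dict.getD_of_not_contains _ _ hc]; norm_num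
      simp only [List.foldl_cons, hp, if_pos, hstep, ih]
      simp only [List.countP_cons, hp, if_pos]
      by_cases h0 : t.countP P = 0
      · simp [h0]
      · rw [if_neg h0, if_neg (by omega), PySem.Dict.getD_insert_self,
          PySem.Dict.insert_insert_self]
        congr 1
        push_cast
        ring
    · simp only [List.foldl_cons, hp, Bool.false_eq_true, if_false, ih]
      simp only [List.countP_cons, hp]; norm_num

def pvZarc (v : List Int) : List Int :=
  (((pvEv v).zip (pvOd v)).filter (fun p => decide (p.1 < p.2 ∧ p.1 ≠ 0))).map Prod.fst

lemma pv_modifyAppend_fold (C : Int × Int → Bool) (i : String) :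
    ∀ (l : List (Int × Int)) (stay : PySem.Dict String (List Int)),
    l.foldl (fun stay p => if C p then stay.modify i [] (· ++ [p.1]) else stay) stay
    = if ((l.filter C).map Prod.fst) = [] then stay
      else stay.modify i [] (· ++ (l.filter C).map Prod.fst) := by
  intro l
  induction l with
  | nil => simp
  | cons a t ih =>
    intro stay
    by_cases hc : C a
    · simp only [List.foldl_cons, hc, if_pos, List.filter_cons_of_pos hc, List.map_cons, ih]
      by_cases h0 : (t.filter C).map Prod.fst = []
      · simp [h0]
      · rw [if_neg h0, if_neg (by simp)]
        simp only [PySem.Dict.modify, PySem.Dict.getD_insert_self,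
          PySem.Dict.insert_insert_self, List.append_assoc, List.singleton_append]
    · simp only [List.foldl_cons, hc, Bool.false_eq_true, if_false,
        ih]
      rw [List.filter_cons_of_neg (by simpa using hc)]

lemma pv_stepA_eq (p : String × List Int) (hev : p.2.length % 2 = 0)
    (stay : PySem.Dict String (List Int)) :
    pvStepA stay p = if pvZarc p.2 = [] then stay
      else stay.modify p.1 [] (· ++ pvZarc p.2) := by
  unfold pvStepA
  rw [pv_range2fold (pvEv p.2) (pvOd p.2) (by rw [pv_len_ev, pv_len_od]; omega)
    (fun st a b => if a < b ∧ a ≠ 0 then st.modify p.1 [] (· ++ [a]) else st) stay]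
  have := pv_modifyAppend_fold (fun q => decide (q.1 < q.2 ∧ q.1 ≠ 0)) p.1
    ((pvEv p.2).zip (pvOd p.2)) stay
  simp only [decide_eq_true_eq] at this
  rw [this]
  rfl

lemma pv_stayFold_get?_not_mem (i : String) :
    ∀ (ps : List (String × List Int)) (stay : PySem.Dict String (List Int)),
    (∀ p ∈ ps, p.2.length % 2 = 0) → (∀ p ∈ ps, p.1 ≠ i) →
    (ps.foldl pvStepA stay).get? i = stay.get? i := by
  intro ps
  induction ps with
  | nil => simp
  | cons p t ih =>
    intro stay hev hne
    rw [List.foldl_cons, ih _ (fun q hq => hev q (by simp [hq])) (fun q hq => hne q (by simp [hq]))]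
    rw [pv_stepA_eq p (hev p (by simp))]
    split_ifs with h0
    · rfl
    · simp only [PySem.Dict.modify]
      exact PySem.Dict.get?_insert_of_ne _ _ (fun h => hne p (by simp) h.symm)

lemma pv_stayFold_get? (i : String) :
    ∀ (ps : List (String × List Int)) (stay : PySem.Dict String (List Int)),
    (ps.map Prod.fst).Nodup → (∀ p ∈ ps, p.2.length % 2 = 0) → stay.get? i = none →
    (ps.foldl pvStepA stay).get? i =
      match ps.find? (fun p => p.1 == i) with
      | some p => if pvZarc p.2 = [] then none else some (pvZarc p.2)
      | none => none := by
  intro ps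
  induction ps with
  | nil => intro stay _ _ h0; simpa using h0
  | cons p t ih =>
    intro stay hnd hev h0
    rw [List.foldl_cons, pv_stepA_eq p (hev p (by simp))]
    by_cases hpi : p.1 = i
    · have hnot : ∀ q ∈ t, q.1 ≠ i := by
        intro q hq
        simp only [List.map_cons, List.nodup_cons] at hnd
        intro hqi; exact hnd.1 (hpi ▸ hqi ▸ (List.mem_map_of_mem hq))
      rw [List.find?_cons_of_pos (by simpa using hpi)]
      split_ifs with hz
      · rw [pv_stayFold_get?_not_mem i t stay (fun q hq => hev q (by simp [hq])) hnot, h0]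
        simp [hz]
      · rw [pv_stayFold_get?_not_mem i t _ (fun q hq => hev q (by simp [hq])) hnot]
        simp only [PySem.Dict.modify]
        rw [hpi, PySem.Dict.get?_insert_self, PySem.Dict.getD_of_get?_eq_none _ _ h0]
        simp [hz]
    · rw [List.find?_cons_of_neg (by simpa using hpi)]
      have hstep : (if pvZarc p.2 = [] then stay else stay.modify p.1 [] (· ++ pvZarc p.2)).get? i = none := by
        split_ifs with hz
        · exact h0
        · simp only [PySem.Dict.modify]
          rw [PySem.Dict.get?_insert_of_ne _ _ (fun h => hpi h.symm)]
          exact h0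
      rw [ih _ (by simp at hnd; exact hnd.2) (fun q hq => hev q (by simp [hq])) hstep]

lemma pv_sentStay_get? (h : PySem.Dict String (List Int)) (hnd : h.keys.Nodup)
    (hev : ∀ p ∈ h.items, p.2.length % 2 = 0) (i : String) :
    (pvSentStay h).get? i =
      match h.get? i with
      | some v => if pvZarc v = [] then none else some (pvZarc v)
      | none => none := by
  unfold pvSentStay
  rw [pv_stayFold_get? i h.items PySem.Dict.empty (by simpa [PySem.Dict.keys] using hnd) hev
    (by simp [PySem.Dict.get?_empty])]
  simp only [PySem.Dict.get?]
  cases hf : h.items.find? (fun p => p.1 == i) <;> simp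

lemma pv_getD_foldl_insert_fun {β : Type} (f : String → β) (dflt : β) :
    ∀ (l : List String) (d : PySem.Dict String β) (k : String),
    ((l.foldl (fun d h => d.insert h (f h)) d).getD k dflt)
      = if k ∈ l then f k else d.getD k dflt := by
  intro l
  induction l with
  | nil => simp
  | cons a t ih =>
    intro d k
    rw [List.foldl_cons, ih]
    by_cases hk : k ∈ t
    · simp [hk]
    · rw [if_neg hk, PySem.Dict.getD_insert]
      by_cases hka : k = a <;> simp [hka, hk]

lemma pv_allList_items {β : Type} [Inhabited β] (tg : List String) (f : String → β) :
    (tg.foldl (fun d h => d.insert h (f h)) PySem.Dict.empty).items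
      = (PySem.List.dedup tg).map (fun h => (h, f h)) := by
  have hnd : (tg.foldl (fun d h => d.insert h (f h)) PySem.Dict.empty).keys.Nodup := by
    exact PySem.Dict.nodup_keys_foldl_insert tg (fun _ h => f h) _ (by simp [PySem.Dict.keys_empty])
  have hkeys : (tg.foldl (fun d h => d.insert h (f h)) PySem.Dict.empty).keys
      = PySem.List.dedup tg := by
    rw [PySem.Dict.keys_foldl_insert tg (fun _ h => f h) _]
    simp [PySem.Dict.keys_empty, PySem.List.dedup, PySem.Set.ofList, PySem.Set.update,
      PySem.Set.empty]
  rw [PySem.Dict.items_eq_map_keys _ hnd default, hkeys]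
  apply List.map_congr_left
  intro k hk
  rw [pv_getD_foldl_insert_fun, if_pos ((PySem.List.mem_dedup tg k).mp hk)]

-- ===== B-side lemmas: the inverted index counts memberships =====

-- one tag's inner posting loop: how it changes the posting list of value x
lemma pv_post_inner_count (d dd : String) (x : Int) :
    ∀ (xs : List Int) (po : PySem.Dict Int (List String)), xs.Nodup →
    (((xs.foldl (fun po x' => po.modify x' [] (· ++ [dd])) po).getD x []).count d)
    = ((po.getD x []).count d) + (if dd = d ∧ x ∈ xs then 1 else 0) := by
  intro xs
  induction xs with
  | nil => simp
  | cons x' t ih =>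
    intro po hnd
    rw [List.foldl_cons, ih _ (List.Nodup.of_cons hnd)]
    rw [PySem.Dict.getD_modify]
    by_cases hx : x = x'
    · subst hx
      have hxt : x ∉ t := (List.nodup_cons.mp hnd).1
      rw [if_pos rfl, List.count_append]
      by_cases hdd : dd = d
      · subst hdd
        simp [hxt]
      · have hcd : List.count d [dd] = 0 := by
          simp [List.count_singleton]
          exact fun h => hdd h
        simp [hdd, hxt, hcd]
    · rw [if_neg hx]
      have hmem : (dd = d ∧ x ∈ x' :: t) ↔ (dd = d ∧ x ∈ t) := by
        constructor
        · rintro ⟨h1, h2⟩; exact ⟨h1, (List.mem_cons.mp h2).resolve_left hx⟩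
        · rintro ⟨h1, h2⟩; exact ⟨h1, List.mem_cons_of_mem _ h2⟩
      rw [if_congr hmem rfl rfl]

-- the full postings build: value x's posting list holds tag d exactly once iff
-- d ∈ tags, d is in the sentence and x is one of d's child values
lemma pv_post_count (s : PySem.Dict String (List Int)) (d : String) (x : Int) :
    ∀ (tags : List String) (po : PySem.Dict Int (List String)), tags.Nodup →
    (((tags.foldl (pvPost s) po).getD x []).count d)
    = ((po.getD x []).count d)
      + (if d ∈ tags ∧ s.contains d = true ∧ x ∈ pvOd (s.getD d []) then 1 else 0) := by
  intro tags
  induction tags with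
  | nil => simp
  | cons d' t ih =>
    intro po hnd
    rw [List.foldl_cons, ih _ (List.Nodup.of_cons hnd)]
    unfold pvPost
    by_cases hc : s.contains d' = true
    · rw [if_pos hc,
        pv_post_inner_count d d' x _ po (PySem.List.nodup_dedup _)]
      by_cases hdd : d' = d
      · have hdt : d ∉ t := by rw [← hdd]; exact (List.nodup_cons.mp hnd).1
        subst hdd
        simp only [PySem.List.mem_dedup]
        by_cases hm : x ∈ pvOd (s.getD d' [])
        · simp [hm, hc, hdt]
        · simp [hm, hc, hdt]
      · have hne : ¬ (d' = d ∧ x ∈ PySem.List.dedup (pvOd (s.getD d' []))) := by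
          intro h; exact hdd h.1
        rw [if_neg hne]
        by_cases hdt : d ∈ t
        · simp [hdt, List.mem_cons]
        · have h1 : ¬ (d ∈ t ∧ s.contains d = true ∧ x ∈ pvOd (s.getD d [])) := by
            intro h; exact hdt h.1
          have h2 : ¬ (d ∈ d' :: t ∧ s.contains d = true ∧ x ∈ pvOd (s.getD d [])) := by
            intro h
            rcases List.mem_cons.mp h.1 with h' | h'
            · exact hdd h'.symm
            · exact hdt h'
          rw [if_neg h1, if_neg h2]
    · rw [if_neg hc]
      by_cases hdd : d' = d
      · subst hdd
        have h1 : ¬ (d' ∈ t ∧ s.contains d' = true ∧ x ∈ pvOd (s.getD d' [])) := by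
          intro h; exact hc h.2.1
        have h2 : ¬ (d' ∈ d' :: t ∧ s.contains d' = true ∧ x ∈ pvOd (s.getD d' [])) := by
          intro h; exact hc h.2.1
        rw [if_neg h1, if_neg h2]
      · by_cases hdt : d ∈ t
        · simp [hdt, List.mem_cons]
        · have h1 : ¬ (d ∈ t ∧ s.contains d = true ∧ x ∈ pvOd (s.getD d [])) := by
            intro h; exact hdt h.1
          have h2 : ¬ (d ∈ d' :: t ∧ s.contains d = true ∧ x ∈ pvOd (s.getD d [])) := by
            intro h
            rcases List.mem_cons.mp h.1 with h' | h'
            · exact hdd h'.symm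
            · exact hdt h'
          rw [if_neg h1, if_neg h2]

-- the counting loop: counts[d] = number of vals whose posting list holds d
lemma pv_counts_getD (post : PySem.Dict Int (List String)) (d : String) (P : Int → Bool)
    (hpost : ∀ x, ((post.getD x []).count d) = if P x then 1 else 0) :
    ∀ (vals : List Int) (c : PySem.Dict String Int),
    ((vals.foldl (fun c x => (post.getD x []).foldl
        (fun c dd => c.insert dd (c.getD dd 0 + 1)) c) c).getD d 0)
    = c.getD d 0 + (vals.countP P : Int) := by
  intro vals
  induction vals with
  | nil => simp
  | cons x t ih =>
    intro c
    rw [List.foldl_cons, ih, PySem.Dict.getD_foldl_insert_add_one, hpost x,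
      List.countP_cons]
    by_cases hp : P x = true
    · simp [hp]; ring
    · simp [hp]

-- pvArcs: same get? characterisation as A's first pass
lemma pv_arcs_fold_not_mem (i : String) :
    ∀ (ps : List (String × List Int)) (acc : PySem.Dict String (List Int)),
    (∀ p ∈ ps, p.1 ≠ i) →
    ((ps.foldl (fun a p =>
        if (((pvEv p.2).zip (pvOd p.2)).filter
            (fun q => decide (q.1 < q.2 ∧ q.1 ≠ 0))).map Prod.fst ≠ []
        then a.insert p.1 ((((pvEv p.2).zip (pvOd p.2)).filter
            (fun q => decide (q.1 < q.2 ∧ q.1 ≠ 0))).map Prod.fst)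
        else a) acc).get? i) = acc.get? i := by
  intro ps
  induction ps with
  | nil => simp
  | cons p t ih =>
    intro acc hne
    rw [List.foldl_cons, ih _ (fun q hq => hne q (by simp [hq]))]
    split_ifs with h0
    · exact PySem.Dict.get?_insert_of_ne _ _ (fun h => hne p (by simp) h.symm)
    · rfl

lemma pv_arcs_get? (raw : List (String × List Int)) (i : String) :
    (pvArcs raw).get? i =
      match (PySem.Dict.ofList raw).get? i with
      | some v => if pvZarc v = [] then none else some (pvZarc v)
      | none => none := by
  unfold pvArcs
  have hnd : ((PySem.Dict.ofList raw).items.map Prod.fst).Nodup := by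
    simpa [PySem.Dict.keys] using PySem.Dict.nodup_keys_ofList raw
  have main : ∀ (ps : List (String × List Int)) (acc : PySem.Dict String (List Int)),
      (ps.map Prod.fst).Nodup → acc.get? i = none →
      ((ps.foldl (fun a p =>
        let vals := (((pvEv p.2).zip (pvOd p.2)).filter
          (fun q => decide (q.1 < q.2 ∧ q.1 ≠ 0))).map Prod.fst
        if vals ≠ [] then a.insert p.1 vals else a) acc).get? i)
      = match ps.find? (fun p => p.1 == i) with
        | some p => if pvZarc p.2 = [] then none else some (pvZarc p.2)
        | none => none := by
    intro ps
    induction ps with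
    | nil => intro acc _ h0; simpa using h0
    | cons p t ih =>
      intro acc hnd h0
      rw [List.foldl_cons]
      by_cases hpi : p.1 = i
      · have hnot : ∀ q ∈ t, q.1 ≠ i := by
          intro q hq hqi
          simp only [List.map_cons, List.nodup_cons] at hnd
          exact hnd.1 (hpi ▸ hqi ▸ (List.mem_map_of_mem hq))
        rw [List.find?_cons_of_pos (by simpa using hpi)]
        have harm := pv_arcs_fold_not_mem i t
          (if (((pvEv p.2).zip (pvOd p.2)).filter
              (fun q => decide (q.1 < q.2 ∧ q.1 ≠ 0))).map Prod.fst ≠ []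
           then acc.insert p.1 ((((pvEv p.2).zip (pvOd p.2)).filter
              (fun q => decide (q.1 < q.2 ∧ q.1 ≠ 0))).map Prod.fst)
           else acc) hnot
        simp only at harm ⊢
        rw [harm]
        by_cases hz : pvZarc p.2 = []
        · have : (((pvEv p.2).zip (pvOd p.2)).filter
              (fun q => decide (q.1 < q.2 ∧ q.1 ≠ 0))).map Prod.fst = [] := hz
          rw [if_neg (by simpa using this), if_pos hz, h0]
        · have hz' : (((pvEv p.2).zip (pvOd p.2)).filter
              (fun q => decide (q.1 < q.2 ∧ q.1 ≠ 0))).map Prod.fst ≠ [] := hz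
          rw [if_pos hz', if_neg hz, hpi, PySem.Dict.get?_insert_self]
          rfl
      · rw [List.find?_cons_of_neg (by simpa using hpi)]
        have hstep : ((if (((pvEv p.2).zip (pvOd p.2)).filter
              (fun q => decide (q.1 < q.2 ∧ q.1 ≠ 0))).map Prod.fst ≠ []
           then acc.insert p.1 ((((pvEv p.2).zip (pvOd p.2)).filter
              (fun q => decide (q.1 < q.2 ∧ q.1 ≠ 0))).map Prod.fst)
           else acc).get? i) = none := by
          split_ifs with hz
          · rw [PySem.Dict.get?_insert_of_ne _ _ (fun h => hpi h.symm)]; exact h0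
          · exact h0
        rw [ih _ (by simp at hnd; exact hnd.2) hstep]
  rw [main _ PySem.Dict.empty hnd (by simp [PySem.Dict.get?_empty])]
  simp only [PySem.Dict.get?]
  cases hf : (PySem.Dict.ofList raw).items.find? (fun p => p.1 == i) <;> simp

-- per-sentence equality: A's counter-indexed scan = B's index-lookup scan
lemma pv_sent_eq (tg : List String) (L : List (PySem.Dict String (List Int))) (n : Nat)
    (hn : n < L.length) (raw : List (String × List Int))
    (hs : L[n] = PySem.Dict.ofList raw)
    (hev : ∀ p ∈ (PySem.Dict.ofList raw).items, p.2.length % 2 = 0)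
    (tup : String) (stay : PySem.Dict String Int) :
    pvSentA ((PySem.List.dedup tg).map (fun h => (h, L.map (pvChild h)))) tup (n : Int)
      stay (pvSentStay (PySem.Dict.ofList raw))
    = pvSentB (PySem.List.dedup tg) tup stay
        (pvArcs raw, (PySem.List.dedup tg).foldl (pvPost (PySem.Dict.ofList raw)) PySem.Dict.empty) := by
  have hget := pv_sentStay_get? (PySem.Dict.ofList raw) (PySem.Dict.nodup_keys_ofList raw) hev tup
  have harc := pv_arcs_get? raw tup
  unfold pvSentA pvSentB
  cases hg : (PySem.Dict.ofList raw).get? tup with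
  | none =>
    have hget2 : (pvSentStay (PySem.Dict.ofList raw)).get? tup = none := by rw [hget, hg]
    have harc2 : (pvArcs raw).get? tup = none := by rw [harc, hg]
    simp only [PySem.Dict.contains_eq_isSome_get?, hget2, harc2, Option.isSome_none,
      Bool.false_eq_true, if_false]
  | some v =>
    have hget2 : (pvSentStay (PySem.Dict.ofList raw)).get? tup
        = if pvZarc v = [] then none else some (pvZarc v) := by rw [hget, hg]
    have harc2 : (pvArcs raw).get? tup
        = if pvZarc v = [] then none else some (pvZarc v) := by rw [harc, hg]
    by_cases hz : pvZarc v = []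
    · rw [if_pos hz] at hget2 harc2
      simp only [PySem.Dict.contains_eq_isSome_get?, hget2, harc2, Option.isSome_none,
        Bool.false_eq_true, if_false]
    · rw [if_neg hz] at hget2 harc2
      simp only [PySem.Dict.contains_eq_isSome_get?, hget2, harc2, Option.isSome_some, if_pos]
      rw [PySem.Dict.getD_of_get?_eq_some _ _ hget2,
        PySem.Dict.getD_of_get?_eq_some _ _ harc2]
      rw [List.foldl_map]
      apply PySem.List.foldl_congr_mem
      intro stay' d hd
      -- A's per-tag step
      have hchild : PySem.List.pyGetD (L.map (pvChild d)) (n : Int) none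
          = pvChild d (PySem.Dict.ofList raw) := by
        rw [PySem.List.pyGetD_natCast]
        simp [List.getD, List.getElem?_map, List.getElem?_eq_getElem hn, hs]
      rw [hchild]
      -- counts.getD d 0 = countP of the membership predicate
      set s := PySem.Dict.ofList raw with hsdef
      have hd' : d ∈ tg := (PySem.List.mem_dedup tg d).mp hd
      have hpost : ∀ x, ((((PySem.List.dedup tg).foldl (pvPost s) PySem.Dict.empty).getD x []).count d)
          = if (s.contains d && (pvOd (s.getD d [])).contains x) then 1 else 0 := by
        intro x
        rw [pv_post_count s d x _ PySem.Dict.empty (PySem.List.nodup_dedup tg)]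
        simp only [PySem.Dict.getD_empty, List.count_nil, Nat.zero_add]
        by_cases hc : s.contains d = true
        · by_cases hm : x ∈ pvOd (s.getD d [])
          · simp [hd', hc, hm]
          · simp [hc, hm]
        · simp [hc]
      have hcnt : (pvCounts (pvZarc v)
            ((PySem.List.dedup tg).foldl (pvPost s) PySem.Dict.empty)).getD d 0
          = ((pvZarc v).countP (fun x => s.contains d && (pvOd (s.getD d [])).contains x) : Int) := by
        unfold pvCounts
        rw [pv_counts_getD _ d _ hpost (pvZarc v) PySem.Dict.empty]
        simp [PySem.Dict.getD_empty]
      -- A's step reduces to the same countP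
      have hA : pvInnerA (pvZarc v) (pvChild d s) d stay'
          = if ((pvZarc v).countP (fun x => s.contains d && (pvOd (s.getD d [])).contains x)) = 0
            then stay'
            else stay'.insert d (stay'.getD d 0
              + ((pvZarc v).countP (fun x => s.contains d && (pvOd (s.getD d [])).contains x) : Int)) := by
        unfold pvInnerA pvChild
        by_cases hc : s.contains d = true
        · have hpred : (fun x => s.contains d && (pvOd (s.getD d [])).contains x)
              = (fun x => (pvOd (s.getD d [])).contains x) := funext fun x => by simp [hc]
          rw [hpred]
          simp only [hc, if_pos]
          rw [PySem.List.foldl_pyRange_zero_pyGetD (pvZarc v) 0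
            (fun stay x => if (pvOd (s.getD d [])).contains x
              then (if stay.contains d then stay.insert d (stay.getD d 0 + 1) else stay.insert d 1)
              else stay) stay']
          rw [pv_incr_fold]
        · have hpred : (fun x => s.contains d && (pvOd (s.getD d [])).contains x)
              = (fun _ => false) := funext fun x => by simp [hc]
          rw [hpred]
          simp only [hc, Bool.false_eq_true, if_false]
          rw [PySem.List.foldl_pyRange_zero_pyGetD (pvZarc v) 0 (fun stay _ => stay) stay',
            PySem.List.foldl_ignore]
          simp
      rw [hA, hcnt]
      by_cases h0 : ((pvZarc v).countP (fun x => s.contains d && (pvOd (s.getD d [])).contains x)) = 0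
      · rw [if_pos h0, if_neg (not_not_intro (by exact_mod_cast h0))]
      · rw [if_neg h0, if_pos (by exact_mod_cast h0)]

lemma pv_count_fold (tg : List String) (all : List (List (String × List Int))) (tup : String)
    (hev : ∀ h ∈ all, ∀ p ∈ (PySem.Dict.ofList h).items, p.2.length % 2 = 0) :
    ∀ (m k : Nat) (stay : PySem.Dict String Int), m = all.length - k →
    ((((all.map PySem.Dict.ofList).drop k).map pvSentStay).foldl
        (fun st sentence =>
          (st.1 + 1,
           pvSentA ((PySem.List.dedup tg).map
             (fun h => (h, (all.map PySem.Dict.ofList).map (pvChild h)))) tup st.1 st.2 sentence))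
        ((k : Int), stay)).2
    = ((all.map (fun s => (pvArcs s,
        (PySem.List.dedup tg).foldl (pvPost (PySem.Dict.ofList s)) PySem.Dict.empty))).drop k).foldl
        (pvSentB (PySem.List.dedup tg) tup) stay := by
  intro m
  induction m with
  | zero =>
    intro k stay hm
    have hk : all.length ≤ k := Nat.le_of_sub_eq_zero hm.symm
    rw [List.drop_eq_nil_of_le (by simpa using hk),
      List.drop_eq_nil_of_le (by simpa using hk)]
    simp
  | succ m ih =>
    intro k stay hm
    have hk : k < all.length := by omega
    have hkL : k < (all.map PySem.Dict.ofList).length := by simpa using hk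
    have hkM : k < (all.map (fun s => (pvArcs s,
        (PySem.List.dedup tg).foldl (pvPost (PySem.Dict.ofList s)) PySem.Dict.empty))).length := by
      simpa using hk
    rw [List.drop_eq_getElem_cons hkL, List.drop_eq_getElem_cons hkM,
      List.map_cons, List.foldl_cons, List.foldl_cons]
    dsimp only
    simp only [List.getElem_map]
    have hsent := pv_sent_eq tg (all.map PySem.Dict.ofList) k hkL all[k]
      (by simp) (hev all[k] (by simp)) tup stay
    rw [hsent]
    have hcast : ((k : Int) + 1) = ((k + 1 : Nat) : Int) := by push_cast; ring
    rw [hcast]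
    exact ih (k + 1) _ (by omega)

-- ===== VERDICT (by name: the statement is the Claim_ definition above) =====
theorem rightArc_spec : Claim_equal_rightArc := by
  intro all tag_group _ hpre
  unfold Spec_rightArc
  unfold rightArc rightArc_alt
  simp only [PySem.List.foldl_append_singleton_eq_map, List.nil_append]
  congr 1
  rw [pv_allList_items tag_group (fun h => (all.map PySem.Dict.ofList).map (pvChild h))]
  congr 1
  apply PySem.List.foldl_congr_mem
  intro rt tup _
  congr 1
  have h0 : ((0 : Int)) = ((0 : Nat) : Int) := by norm_num
  rw [h0]
  have := pv_count_fold tag_group all tup hpre all.length 0 PySem.Dict.empty (by omega)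
  simpa using this
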